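-- pv_equiv track=rewrite | github.com/NickkHorn/Machine-Learning | cap3/decision trees/d_tree.py | __get_labels_count
-- ===== SOURCE A (Python) =====
-- def __get_labels_count(labels):
--     unique_labels = [] # ottengo tutti gli indici/target delle classi uniche
--     label_counts = [] # per ogni indice in unique_label questa lista contiene il numero di volte che appare in data
--     for target in labels:
--         if target not in unique_labels:
--             unique_labels.append(target)
--             label_counts.append(1) # se la classe è nuova allora per ora appare solo una volta
--         else:
--             labels_list_idx = unique_labels.index(target)
--             label_counts[labels_list_idx] += 1
--
--     return unique_labels, label_counts
-- ===== SOURCE B (Python) =====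
-- def __get_labels_count(labels):
--     # Two staged passes: first the ordered uniques, then a per-key count; no fused discover-and-increment loop.
--     unique_labels = list(dict.fromkeys(labels))
--     label_counts = [labels.count(x) for x in unique_labels]
--     return unique_labels, label_counts
-- ===== Notes on version B (the rewrite author's own statement) =====
-- stated objective: simpler
-- what changed: Splits A's single fused discover-and-increment loop into two staged passes: dict.fromkeys builds the first-appearance unique list, then a separate per-key labels.count pass produces the counts; no counts are maintained during the scan.
import Mathlib
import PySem

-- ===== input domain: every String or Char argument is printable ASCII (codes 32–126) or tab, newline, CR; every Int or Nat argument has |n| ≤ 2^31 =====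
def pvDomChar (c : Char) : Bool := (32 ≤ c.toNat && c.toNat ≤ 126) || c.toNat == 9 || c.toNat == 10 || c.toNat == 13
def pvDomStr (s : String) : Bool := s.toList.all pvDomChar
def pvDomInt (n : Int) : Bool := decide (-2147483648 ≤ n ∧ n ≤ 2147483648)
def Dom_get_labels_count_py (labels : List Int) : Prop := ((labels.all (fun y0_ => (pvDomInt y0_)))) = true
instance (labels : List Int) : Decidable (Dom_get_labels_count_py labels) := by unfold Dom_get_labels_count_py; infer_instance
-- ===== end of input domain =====

-- B splits A's fused discover-and-increment loop into two staged passes (ordered dedup, then per-key count); objective: simpler.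


-- ===== PORT A =====
-- one fused loop: discover new labels and increment counts via index lookup
def get_labels_count_py (labels : List Int) : List Int × List Int :=
  labels.foldl
    (fun st target =>
      if st.1.contains target then
        match PySem.List.index? st.1 target with
        | some i => (st.1, st.2.set i (st.2.getD i 0 + 1))
        | none => st            -- unreachable: target ∈ st.1
      else (st.1 ++ [target], st.2 ++ [1]))
    ([], [])

-- ===== PORT B =====
-- B: phase 1 builds the first-appearance unique list (dict.fromkeys = PySem.List.dedup),
-- phase 2 maps labels.count over it
def get_labels_count_py_alt (labels : List Int) : List Int × List Int :=
  let unique_labels := PySem.List.dedup labels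
  let label_counts := unique_labels.map (fun x => ((labels.count x : Nat) : Int))
  (unique_labels, label_counts)

-- ===== PRECONDITION & SPEC =====
def Spec_get_labels_count_py (labels : List Int) (out : List Int × List Int) : Prop := out = get_labels_count_py_alt labels
instance (labels : List Int) (out : List Int × List Int) : Decidable (Spec_get_labels_count_py labels out) := by unfold Spec_get_labels_count_py; infer_instance

-- ===== CLAIM (what is proved, stated in full; the proofs are below) =====
def Claim_equal_get_labels_count_py : Prop := ∀ (labels : List Int), Dom_get_labels_count_py labels → Spec_get_labels_count_py labels (get_labels_count_py labels)

-- ===== LEMMAS AND PROOFS =====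

-- at a repeated label, writing c t + 1 at its (unique) index equals remapping every count
lemma glc_map_set (u : List Int) (hn : u.Nodup) (k : Nat) (hk : k < u.length) (t : Int)
    (ht : u[k] = t) (c c' : Int → Int)
    (hc : ∀ x ∈ u, x ≠ t → c' x = c x) (hct : c' t = c t + 1) :
    (u.map c).set k (c t + 1) = u.map c' := by
  apply List.ext_getElem (by simp)
  intro j hj1 hj2
  have hj : j < u.length := by simpa using hj2
  simp only [List.getElem_set, List.getElem_map]
  by_cases hjk : j = k
  · subst hjk; simp [ht, hct]
  · have hne : u[j] ≠ t := by
      intro he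
      exact hjk ((List.Nodup.getElem_inj_iff hn).mp (by rw [he, ← ht]))
    rw [if_neg (fun h => hjk h.symm), hc _ (List.getElem_mem hj) hne]

-- loop invariant of A: after processing l, the state is (ordered uniques of l, their counts in l)
lemma glc_inv (l : List Int) :
    get_labels_count_py l =
      (PySem.List.dedup l, (PySem.List.dedup l).map (fun x => ((l.count x : Nat) : Int))) := by
  induction l using List.reverseRecOn with
  | nil => rfl
  | append_singleton l t ih =>
    have hded : PySem.List.dedup (l ++ [t]) =
        if (PySem.List.dedup l).contains t then PySem.List.dedup l
        else PySem.List.dedup l ++ [t] := by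
      simp [PySem.List.dedup_eq_ofList, PySem.Set.ofList_eq_foldl, List.foldl_append,
        PySem.Set.add]
    unfold get_labels_count_py at ih ⊢
    rw [List.foldl_append, ih]
    simp only [List.foldl_cons, List.foldl_nil]
    by_cases hmem : t ∈ PySem.List.dedup l
    · have hcont : (PySem.List.dedup l).contains t = true := by simpa using hmem
      obtain ⟨k, hik⟩ := Option.isSome_iff_exists.mp
        ((PySem.List.index?_isSome_iff _ _).mpr hmem)
      obtain ⟨hk, hkt, -⟩ := PySem.List.getElem_of_index?_eq_some hik
      have hgetD :
          ((PySem.List.dedup l).map (fun x => ((l.count x : Nat) : Int))).getD k 0 =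
            ((l.count t : Nat) : Int) := by
        rw [List.getD_eq_getElem _ _ (by simpa using hk)]
        simp only [List.getElem_map]
        rw [hkt]
      rw [if_pos hcont, hik]
      simp only [hgetD]
      rw [hded, if_pos hcont]
      refine Prod.ext rfl ?_
      simp only []
      rw [glc_map_set (PySem.List.dedup l) (PySem.List.nodup_dedup l) k hk t hkt
        (fun x => ((l.count x : Nat) : Int)) (fun x => (((l ++ [t]).count x : Nat) : Int))
        ?_ ?_]
      · intro x hx hxt
        simp [List.count_append, Ne.symm hxt]
      · push_cast [List.count_append]
        simp
    · have hcont : (PySem.List.dedup l).contains t = false := by simpa using hmem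
      have htl : t ∉ l := by rwa [PySem.List.mem_dedup] at hmem
      rw [if_neg (by simpa using hmem), hded, if_neg (by simpa using hmem)]
      refine Prod.ext rfl ?_
      simp only [List.map_append, List.map_cons, List.map_nil]
      congr 1
      · apply List.map_congr_left
        intro x hx
        have hxt : x ≠ t := fun h => htl ((PySem.List.mem_dedup _ _).mp (h ▸ hx))
        simp [List.count_append, Ne.symm hxt]
      · simp [List.count_append, List.count_eq_zero.mpr htl]

-- ===== VERDICT (by name: the statement is the Claim_ definition above) =====
theorem get_labels_count_py_spec : Claim_equal_get_labels_count_py := by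
  intro labels _
  unfold Spec_get_labels_count_py get_labels_count_py_alt
  rw [glc_inv]
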